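-- pv_equiv track=rewrite | github.com/brianhilsden/DSA | Leetcode/FindLargestPothole.py | solution
-- ===== SOURCE A (Python) =====
-- def solution(R, N):
--     max_product = 0
--     current_largest = 0
--     current_length = 0
--
--     for i in range(N):
--         if R[i] != 0:
--             current_length += 1
--             if R[i] > current_largest:
--                 current_largest = R[i]
--         else:
--             if current_length > 0:
--                 product = current_largest * current_length
--                 if product > max_product:
--                     max_product = product
--                 current_largest = 0
--                 current_length = 0
--
--
--     if current_length > 0:
--         product = current_largest * current_length
--         if product > max_product:
--             max_product = product
--
--     return max_product
-- ===== SOURCE B (Python) =====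
-- def solution(R, N):
--     # Two-phase: collect the maximal nonzero runs of the first N elements,
--     # then reduce: max over runs of max(0, max(run)) * len(run), default 0.
--     prefix = R[:max(N, 0)]
--     segments = []
--     cur = []
--     for x in prefix:
--         if x != 0:
--             cur.append(x)
--         else:
--             if cur:
--                 segments.append(cur)
--             cur = []
--     if cur:
--         segments.append(cur)
--     return max((max(0, max(s)) * len(s) for s in segments), default=0)
-- ===== Notes on version B (the rewrite author's own statement) =====
-- stated objective: alternative
-- what changed: Replaces A's single loop with inline running-state accumulation (current run max/length plus best product) by a two-phase decomposition: first collect the maximal nonzero runs of R[:N], then reduce with max over runs of max(0, max(run)) * len(run), default 0.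
import Mathlib
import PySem

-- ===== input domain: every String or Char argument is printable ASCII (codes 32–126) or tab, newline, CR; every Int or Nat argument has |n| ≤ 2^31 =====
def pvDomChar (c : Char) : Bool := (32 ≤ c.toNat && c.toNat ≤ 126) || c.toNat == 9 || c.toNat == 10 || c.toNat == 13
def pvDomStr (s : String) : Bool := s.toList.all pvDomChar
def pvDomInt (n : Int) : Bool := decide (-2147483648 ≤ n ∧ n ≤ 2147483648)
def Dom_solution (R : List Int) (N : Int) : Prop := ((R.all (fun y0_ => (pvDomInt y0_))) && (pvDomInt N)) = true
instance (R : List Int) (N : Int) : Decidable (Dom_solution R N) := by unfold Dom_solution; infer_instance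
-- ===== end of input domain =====

-- B replaces A's inline running-state loop by a two-phase segment-then-reduce decomposition (same cost).


-- ===== PORT A =====
-- state = (max_product, current_largest, current_length); R[i] is pyGetD R i 0,
-- exact wherever Pre_solution keeps the index in range (Python raises outside Pre_).
def solutionStep (R : List Int) (st : Int × Int × Int) (i : Int) : Int × Int × Int :=
  let x := PySem.List.pyGetD R i 0
  if x ≠ 0 then
    (st.1, (if x > st.2.1 then x else st.2.1), st.2.2 + 1)
  else if st.2.2 > 0 then
    (if st.2.1 * st.2.2 > st.1 then st.2.1 * st.2.2 else st.1, 0, 0)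
  else st

def solution (R : List Int) (N : Int) : Int :=
  let st := (PySem.List.pyRange 0 N 1).foldl (solutionStep R) (0, 0, 0)
  if st.2.2 > 0 then
    (if st.2.1 * st.2.2 > st.1 then st.2.1 * st.2.2 else st.1)
  else st.1

-- ===== PORT B =====
-- max(0, max(s)) * len(s) for a nonzero run s
def segVal (s : List Int) : Int :=
  max 0 ((PySem.List.max? s (fun y => y)).getD 0) * s.length

def solution_alt (R : List Int) (N : Int) : Int :=
  let pfx := PySem.List.slice R none (some (max N 0))
  let st := pfx.foldl
    (fun (st : List (List Int) × List Int) x =>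
      if x ≠ 0 then (st.1, st.2 ++ [x])
      else if st.2 ≠ [] then (st.1 ++ [st.2], []) else st)
    ([], [])
  let segments := if st.2 ≠ [] then st.1 ++ [st.2] else st.1
  PySem.List.maxD (segments.map segVal) (fun y => y) 0

-- ===== PRECONDITION & SPEC =====
-- A indexes R[i] for i in range(N), so it raises IndexError exactly when N > len(R);
-- Pre_ excludes only those inputs (A returns on every input it admits).
def Pre_solution (R : List Int) (N : Int) : Prop := N ≤ (R.length : Int)
instance (R : List Int) (N : Int) : Decidable (Pre_solution R N) := by unfold Pre_solution; infer_instance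
def pvWitness_solution : List Int × Int := ([1, -2, 3, 0, 4], 5)

def Spec_solution (R : List Int) (N : Int) (out : Int) : Prop := out = solution_alt R N
instance (R : List Int) (N : Int) (out : Int) : Decidable (Spec_solution R N out) := by unfold Spec_solution; infer_instance

-- ===== CLAIM (what is proved, stated in full; the proofs are below) =====
def Claim_equal_solution : Prop := ∀ (R : List Int) (N : Int), Dom_solution R N → Pre_solution R N → Spec_solution R N (solution R N)

-- ===== LEMMAS AND PROOFS =====

theorem foldl_max_max (t : List Int) (a b : Int) :
    t.foldl max (max a b) = max a (t.foldl max b) := by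
  induction t generalizing b with
  | nil => rfl
  | cons h tl ih => simpa [max_assoc] using ih (max b h)

theorem segVal_nonneg (s : List Int) : 0 ≤ segVal s := by
  unfold segVal
  positivity

theorem segVal_eq_foldl (h : Int) (t : List Int) :
    segVal (h :: t) = t.foldl max (max 0 h) * (t.length + 1) := by
  unfold segVal
  rw [PySem.List.max?_id_cons, foldl_max_max t 0 h]
  simp only [Option.getD_some, List.length_cons]
  push_cast
  ring

-- Python max(vals, default=0) over nonnegative values IS the running max from 0.
theorem maxD_eq_foldl (l : List Int) (h : ∀ x ∈ l, 0 ≤ x) :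
    PySem.List.maxD l (fun y => y) 0 = l.foldl max 0 := by
  cases l with
  | nil => rfl
  | cons x t =>
    show (PySem.List.max? (x :: t) (fun y => y)).getD 0 = _
    rw [PySem.List.max?_id_cons]
    simp only [Option.getD_some, List.foldl_cons]
    rw [show max (0 : Int) x = x from max_eq_right (h x (by simp))]

-- the invariant linking A's state (mp, cl, cln) to B's state (segs, cur)
def InvAB (st : Int × Int × Int) (bst : List (List Int) × List Int) : Prop :=
  st.1 = (bst.1.map segVal).foldl max 0 ∧
  st.2.1 = bst.2.foldl max 0 ∧
  st.2.2 = (bst.2.length : Int)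

def aStep (st : Int × Int × Int) (x : Int) : Int × Int × Int :=
  if x ≠ 0 then
    (st.1, (if x > st.2.1 then x else st.2.1), st.2.2 + 1)
  else if st.2.2 > 0 then
    (if st.2.1 * st.2.2 > st.1 then st.2.1 * st.2.2 else st.1, 0, 0)
  else st

def bStep (st : List (List Int) × List Int) (x : Int) : List (List Int) × List Int :=
  if x ≠ 0 then (st.1, st.2 ++ [x])
  else if st.2 ≠ [] then (st.1 ++ [st.2], []) else st

theorem segVal_closes (cur : List Int) (hne : cur ≠ []) :
    segVal cur = cur.foldl max 0 * cur.length := by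
  cases cur with
  | nil => exact absurd rfl hne
  | cons h t => rw [segVal_eq_foldl]; simp

-- closing a nonempty run: A's "if product > max_product" update matches appending the run on B's side
theorem close_run (mp cl cln : Int) (segs : List (List Int)) (cur : List Int)
    (hc : cur ≠ []) (h1 : mp = (segs.map segVal).foldl max 0)
    (h2 : cl = cur.foldl max 0) (h3 : cln = (cur.length : Int)) :
    (if cl * cln > mp then cl * cln else mp) = (((segs ++ [cur]).map segVal).foldl max 0) := by
  rw [List.map_append, List.map_cons, List.map_nil, List.foldl_append,
      List.foldl_cons, List.foldl_nil, segVal_closes cur hc, ← h2, ← h3, ← h1]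
  rcases lt_or_ge mp (cl * cln) with hlt | hge
  · rw [if_pos hlt, max_eq_right hlt.le]
  · rw [if_neg (not_lt.mpr hge), max_eq_left hge]

theorem inv_step (st : Int × Int × Int) (bst : List (List Int) × List Int) (x : Int)
    (h : InvAB st bst) : InvAB (aStep st x) (bStep bst x) := by
  obtain ⟨mp, cl, cln⟩ := st
  obtain ⟨segs, cur⟩ := bst
  obtain ⟨h1, h2, h3⟩ := h
  simp only [InvAB] at h1 h2 h3 ⊢
  by_cases hx : x = 0
  · subst hx
    by_cases hc : cur = []
    · have hcl : cln = 0 := by simp [h3, hc]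
      subst hc
      simp [aStep, bStep, hcl, h1, h2]
    · have hlen : 0 < cln := by
        rw [h3]; exact_mod_cast List.length_pos_iff.mpr hc
      simp only [aStep, bStep, ne_eq, not_true_eq_false, if_false, if_pos hc,
        gt_iff_lt, if_pos hlen]
      exact ⟨close_run mp cl cln segs cur hc h1 h2 h3, rfl, rfl⟩
  · simp only [aStep, bStep, ne_eq, hx, not_false_eq_true, if_pos]
    refine ⟨h1, ?_, ?_⟩
    · rw [List.foldl_append, List.foldl_cons, List.foldl_nil, ← h2]
      rcases lt_or_ge cl x with hlt | hge
      · rw [if_pos hlt, max_eq_right hlt.le]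
      · rw [if_neg (not_lt.mpr hge), max_eq_left hge]
    · simp [h3]

theorem inv_fold (P : List Int) (st : Int × Int × Int) (bst : List (List Int) × List Int)
    (h : InvAB st bst) : InvAB (P.foldl aStep st) (P.foldl bStep bst) := by
  induction P generalizing st bst with
  | nil => exact h
  | cons x t ih => exact ih _ _ (inv_step st bst x h)

theorem solutionStep_eq (R : List Int) (st : Int × Int × Int) (i : Int) :
    solutionStep R st i = aStep st (PySem.List.pyGetD R i 0) := rfl

-- the main agreement lemma on the common prefix list
theorem agree_on_prefix (P : List Int) :
    (let st := P.foldl aStep ((0 : Int), (0 : Int), (0 : Int))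
     if st.2.2 > 0 then
       (if st.2.1 * st.2.2 > st.1 then st.2.1 * st.2.2 else st.1)
     else st.1) =
    (let bst := P.foldl bStep (([] : List (List Int)), ([] : List Int))
     PySem.List.maxD ((if bst.2 ≠ [] then bst.1 ++ [bst.2] else bst.1).map segVal) (fun y => y) 0) := by
  have hinv := inv_fold P ((0 : Int), (0 : Int), (0 : Int)) (([] : List (List Int)), ([] : List Int))
    ⟨rfl, rfl, rfl⟩
  set st := P.foldl aStep ((0 : Int), (0 : Int), (0 : Int)) with hst
  set bst := P.foldl bStep (([] : List (List Int)), ([] : List Int)) with hbst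
  obtain ⟨h1, h2, h3⟩ := hinv
  simp only
  rw [maxD_eq_foldl _ (by intro y hy; obtain ⟨s, _, rfl⟩ := List.mem_map.mp hy; exact segVal_nonneg s)]
  by_cases hc : bst.2 = []
  · have h0 : st.2.2 = 0 := by simp [h3, hc]
    rw [if_neg (by simp [hc] : ¬ bst.2 ≠ []), if_neg (by simp [h0] : ¬ st.2.2 > 0), h1]
  · have hlen : 0 < st.2.2 := by
      rw [h3]; exact_mod_cast List.length_pos_iff.mpr hc
    rw [if_pos hc, if_pos hlen]
    exact close_run st.1 st.2.1 st.2.2 bst.1 bst.2 hc h1 h2 h3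

-- A's loop over range(N) with R[i] is the fold of aStep over the prefix take N
theorem aFold_eq_prefix (R : List Int) (N : Int) (h0 : 0 ≤ N) (hle : N ≤ (R.length : Int)) :
    (PySem.List.pyRange 0 N 1).foldl (solutionStep R) ((0 : Int), (0 : Int), (0 : Int)) =
      (R.take N.toNat).foldl aStep ((0 : Int), (0 : Int), (0 : Int)) := by
  have hlen : ((R.take N.toNat).length : Int) = N := by
    simp; omega
  have hcongr : (PySem.List.pyRange 0 N 1).foldl (solutionStep R) ((0 : Int), (0 : Int), (0 : Int)) =
      (PySem.List.pyRange 0 N 1).foldl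
        (fun acc j => aStep acc (PySem.List.pyGetD (R.take N.toNat) j 0)) ((0 : Int), (0 : Int), (0 : Int)) := by
    apply PySem.List.foldl_congr_mem
    intro acc x hx
    rw [solutionStep_eq]
    congr 1
    rw [PySem.List.mem_pyRange_one] at hx
    rw [PySem.List.pyGetD_eq_getElem R 0 hx.1 (by omega),
        PySem.List.pyGetD_eq_getElem (R.take N.toNat) 0 hx.1 (by rw [hlen]; exact hx.2)]
    exact (List.getElem_take).symm
  rw [hcongr]
  have hlen2 : PySem.List.len (R.take N.toNat) = N := by
    rw [PySem.List.len_eq]; exact hlen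
  have key := PySem.List.foldl_pyRange_zero_pyGetD (R.take N.toNat) (0 : Int) aStep
    ((0 : Int), (0 : Int), (0 : Int))
  rw [hlen2] at key
  exact key

-- ===== VERDICT (by name: the statement is the Claim_ definition above) =====
theorem solution_spec : Claim_equal_solution := by
  intro R N _ hpre
  show solution R N = solution_alt R N
  have hpre' : N ≤ (R.length : Int) := hpre
  by_cases h0 : 0 ≤ N
  · have hsl : PySem.List.slice R none (some (max N 0)) = R.take N.toNat := by
      rw [max_eq_left h0]; exact PySem.List.slice_to R h0
    unfold solution solution_alt
    rw [hsl, aFold_eq_prefix R N h0 hpre']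
    exact agree_on_prefix (R.take N.toNat)
  · have hr : PySem.List.pyRange 0 N 1 = [] := PySem.List.pyRange_one_eq_nil (by omega)
    have hsl : PySem.List.slice R none (some (max N 0)) = ([] : List Int) := by
      rw [max_eq_right (by omega : N ≤ 0)]
      simpa using PySem.List.slice_to R (le_refl 0)
    unfold solution solution_alt
    rw [hr, hsl]
    rfl
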